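-- pv_equiv track=rewrite | github.com/macisamuele/python-pretty-toml | contoml/util.py | chunkate_string
-- ===== SOURCE A (Python) =====
-- def chunkate_string(text, length):
--     """
--     Iterates over the given seq in chunks of at maximally the given length. Will never break a whole word.
--     """
--     iterator_index = 0
--
--     def next_newline():
--         try:
--             return next(i for (i, c) in enumerate(text) if i > iterator_index and c == '\n')
--         except StopIteration:
--             return len(text)
--
--     def next_breaker():
--         try:
--             return next(i for (i, c) in reversed(tuple(enumerate(text)))
--                         if i >= iterator_index and
--                         (i < iterator_index+length) and
--                         c in (' ', '\t'))
--         except StopIteration: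
--             return len(text)
--
--     while iterator_index < len(text):
--         next_chunk = text[iterator_index:min(next_newline(), next_breaker()+1)]
--         iterator_index += len(next_chunk)
--         yield next_chunk
-- ===== SOURCE B (Python) =====
-- def chunkate_string(text, length):
--     """
--     Iterates over the given seq in chunks of at maximally the given length. Will never break a whole word.
--     """
--     # Preprocess once: sorted position indexes of newlines and of word breaks,
--     # then answer each chunk's two queries by binary search instead of scanning.
--     nls = []
--     brs = []
--     for j, c in enumerate(text):
--         if c == '\n':
--             nls.append(j)
--         elif c in (' ', '\t'):
--             brs.append(j)
--     n = len(text)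
--     i = 0
--     while i < n:
--         # first newline strictly after i
--         k = _bisect_right(nls, i)
--         nl = nls[k] if k < len(nls) else n
--         # last word break below i + length (must also be >= i to count)
--         m = _bisect_left(brs, i + length)
--         end = min(nl, brs[m - 1] + 1) if m > 0 and brs[m - 1] >= i else nl
--         yield text[i:end]
--         i = end
--
--
-- def _bisect_right(a, x):
--     lo, hi = 0, len(a)
--     while lo < hi:
--         mid = (lo + hi) // 2
--         if a[mid] <= x:
--             lo = mid + 1
--         else:
--             hi = mid
--     return lo
--
--
-- def _bisect_left(a, x):
--     lo, hi = 0, len(a)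
--     while lo < hi:
--         mid = (lo + hi) // 2
--         if a[mid] < x:
--             lo = mid + 1
--         else:
--             hi = mid
--     return lo
-- ===== Notes on version B (the rewrite author's own statement) =====
-- stated objective: faster
-- what changed: B preprocesses the string once into two sorted arrays of newline and word-break positions and answers each chunk's boundary queries by binary search, instead of A's whole-string enumerate scan (forward and reversed) on every chunk.
import Mathlib
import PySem

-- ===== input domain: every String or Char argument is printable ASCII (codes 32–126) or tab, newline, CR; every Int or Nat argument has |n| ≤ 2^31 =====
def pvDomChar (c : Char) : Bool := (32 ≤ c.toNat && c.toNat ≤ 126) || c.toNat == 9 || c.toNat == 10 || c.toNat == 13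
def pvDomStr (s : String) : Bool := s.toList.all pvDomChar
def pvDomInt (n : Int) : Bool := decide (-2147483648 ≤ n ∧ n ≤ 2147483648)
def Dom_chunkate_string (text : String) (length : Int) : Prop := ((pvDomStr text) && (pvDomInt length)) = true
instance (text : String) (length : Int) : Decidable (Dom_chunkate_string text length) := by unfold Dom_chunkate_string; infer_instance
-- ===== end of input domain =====

-- B preprocesses the string once into two sorted position arrays (newlines, word breaks) and answers
-- each chunk's boundary queries by binary search, instead of A's whole-string scans on every chunk;
-- both Pythons are generators and are compared as the list of yielded chunks.

-- ===== PORT A =====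
-- next_newline(): first index strictly after iterator_index holding '\n', else len(text)
def pvNextNewlineA (cs : List Char) (idx : Int) : Int :=
  match (PySem.List.enumerate cs 0).find? (fun p => decide (idx < p.1) && (p.2 == '\n')) with
  | some p => p.1
  | none => (cs.length : Int)

-- next_breaker(): scanning reversed(enumerate(text)): first (i.e. last in text order) index in
-- [iterator_index, iterator_index+length) holding ' ' or '\t', else len(text)
def pvNextBreakerA (cs : List Char) (idx len : Int) : Int :=
  match ((PySem.List.enumerate cs 0).reverse).find?
      (fun p => decide (idx ≤ p.1) && decide (p.1 < idx + len) && (p.2 == ' ' || p.2 == '\t')) with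
  | some p => p.1
  | none => (cs.length : Int)

-- the while loop; fuel = len(text) bounds the iteration count (each chunk is nonempty)
def pvLoopA (cs : List Char) (len : Int) (fuel : Nat) (idx : Int) : List (List Char) :=
  match fuel with
  | 0 => []
  | f+1 =>
    if idx < (cs.length : Int) then
      let chunk := PySem.List.slice cs (some idx)
        (some (min (pvNextNewlineA cs idx) (pvNextBreakerA cs idx len + 1)))
      chunk :: pvLoopA cs len f (idx + (chunk.length : Int))
    else []

def chunkate_string (text : String) (length : Int) : List String :=
  (pvLoopA text.toList length text.toList.length 0).map String.ofList

-- ===== PORT B =====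
-- single pass over enumerate(text): the (increasing) positions of newlines and of word breaks
def pvScan (cs : List Char) : List Int × List Int :=
  (PySem.List.enumerate cs 0).foldl
    (fun acc p =>
      if p.2 == '\n' then (acc.1 ++ [p.1], acc.2)
      else if (p.2 == ' ' || p.2 == '\t') then (acc.1, acc.2 ++ [p.1])
      else acc)
    ([], [])

-- Source B's _bisect_right/_bisect_left are the textbook bisect loops; ported as the prelude's
-- PySem.List.bisectRight / bisectLeft (the identical lo/hi halving loop).
-- the body of Source B's while loop: the cut position `end` for the chunk starting at i
def pvCut (cs : List Char) (nls brs : List Int) (len : Int) (i : Int) : Int :=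
  let k := PySem.List.bisectRight nls i
  let nl := if k < nls.length then PySem.List.pyGetD nls (k : Int) 0 else (cs.length : Int)
  let m := PySem.List.bisectLeft brs (i + len)
  if 0 < m ∧ i ≤ PySem.List.pyGetD brs ((m : Int) - 1) 0
    then min nl (PySem.List.pyGetD brs ((m : Int) - 1) 0 + 1) else nl

-- the while loop of Source B; fuel = len(text) bounds the iteration count
def pvLoopB (cs : List Char) (nls brs : List Int) (len : Int) (fuel : Nat) (i : Int) : List (List Char) :=
  match fuel with
  | 0 => []
  | f+1 =>
    if i < (cs.length : Int) then
      let e := pvCut cs nls brs len i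
      PySem.List.slice cs (some i) (some e) :: pvLoopB cs nls brs len f e
    else []

def chunkate_string_alt (text : String) (length : Int) : List String :=
  let cs := text.toList
  let nb := pvScan cs
  (pvLoopB cs nb.1 nb.2 length cs.length 0).map String.ofList

-- ===== PRECONDITION & SPEC =====
def Spec_chunkate_string (text : String) (length : Int) (out : List String) : Prop := out = chunkate_string_alt text length
instance (text : String) (length : Int) (out : List String) : Decidable (Spec_chunkate_string text length out) := by unfold Spec_chunkate_string; infer_instance

-- ===== CLAIM (what is proved, stated in full; the proofs are below) =====
def Claim_equal_chunkate_string : Prop := ∀ (text : String) (length : Int), Dom_chunkate_string text length → Spec_chunkate_string text length (chunkate_string text length)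

-- ===== LEMMAS AND PROOFS =====

-- the two character predicates, by position
def pvPN (cs : List Char) (j : Int) : Bool := PySem.List.pyGetD cs j ' ' == '\n'
def pvPB (cs : List Char) (j : Int) : Bool :=
  PySem.List.pyGetD cs j ' ' == ' ' || PySem.List.pyGetD cs j ' ' == '\t'

-- the two position arrays B precomputes
def pvNLS (cs : List Char) : List Int := (PySem.List.pyRange 0 (cs.length : Int) 1).filter (pvPN cs)
def pvBRS (cs : List Char) : List Int := (PySem.List.pyRange 0 (cs.length : Int) 1).filter (pvPB cs)

theorem pvFind?_congr {α : Type} (l : List α) (p q : α → Bool) (h : ∀ x ∈ l, p x = q x) :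
    l.find? p = l.find? q := by
  induction l with
  | nil => rfl
  | cons a t ih =>
    simp only [List.find?_cons]
    rw [h a (by simp)]
    cases q a
    · exact ih (fun x hx => h x (by simp [hx]))
    · rfl

-- find? hits exactly position k (all earlier entries fail, entry k succeeds if it exists)
theorem pvFind?_at {α : Type} (l : List α) (p : α → Bool) (k : Nat) (hk : k ≤ l.length)
    (h1 : ∀ (j : Nat) (hj : j < l.length), j < k → p l[j] = false)
    (h2 : ∀ (h : k < l.length), p l[k] = true) :
    l.find? p = l[k]? := by
  induction l generalizing k with
  | nil =>
    simp only [List.length_nil, Nat.le_zero] at hk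
    subst hk; simp
  | cons a t ih =>
    cases k with
    | zero =>
      have hp := h2 (by simp)
      simp only [List.getElem_cons_zero] at hp
      rw [List.find?_cons_of_pos hp]
      simp
    | succ k' =>
      have ha : p a = false := by simpa using h1 0 (by simp) (by omega)
      rw [List.find?_cons_of_neg (by simp [ha])]
      simp only [List.getElem?_cons_succ]
      refine ih k' (by simp only [List.length_cons] at hk; omega)
        (fun j hj hjk => by
          simpa using h1 (j+1) (by simp only [List.length_cons]; omega) (by omega))
        (fun h => by
          simpa using h2 (by simp only [List.length_cons]; omega))

-- the scanning fold splits into the two filters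
theorem pvScanAux (cs : List Char) (l : List Int) (a b : List Int) :
    l.foldl (fun acc j =>
        if PySem.List.pyGetD cs j ' ' == '\n' then (acc.1 ++ [j], acc.2)
        else if (PySem.List.pyGetD cs j ' ' == ' ' || PySem.List.pyGetD cs j ' ' == '\t') then (acc.1, acc.2 ++ [j])
        else acc) (a, b)
      = (a ++ l.filter (pvPN cs), b ++ l.filter (pvPB cs)) := by
  induction l generalizing a b with
  | nil => simp
  | cons j t ih =>
    simp only [List.foldl_cons]
    by_cases hf : PySem.List.pyGetD cs j ' ' == '\n'
    · have hc : PySem.List.pyGetD cs j ' ' = '\n' := by simpa using hf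
      rw [if_pos hf, ih]
      simp [pvPN, pvPB, hc, List.append_assoc]
    · by_cases hg : (PySem.List.pyGetD cs j ' ' == ' ' || PySem.List.pyGetD cs j ' ' == '\t')
      · rw [if_neg hf, if_pos hg, ih]
        simp [pvPN, pvPB, hf, hg, List.append_assoc]
      · rw [if_neg hf, if_neg hg, ih]
        simp [pvPN, pvPB, hf, hg]

theorem pvScan_eq (cs : List Char) : pvScan cs = (pvNLS cs, pvBRS cs) := by
  unfold pvScan pvNLS pvBRS
  rw [PySem.List.enumerate_eq_map_pyRange cs ' ', List.foldl_map]
  exact pvScanAux cs _ [] []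

-- A's newline scan, re-expressed over the index range [0, n)
theorem pvNextNewlineA_eq (cs : List Char) (idx : Int) :
    pvNextNewlineA cs idx =
      (match (PySem.List.pyRange 0 (cs.length : Int) 1).find?
          (fun j => decide (idx < j) && (PySem.List.pyGetD cs j ' ' == '\n')) with
        | some j => j
        | none => (cs.length : Int)) := by
  unfold pvNextNewlineA
  rw [PySem.List.enumerate_eq_map_pyRange cs ' ', List.find?_map]
  cases h : (PySem.List.pyRange 0 (cs.length : Int) 1).find?
      (fun j => decide (idx < j) && (PySem.List.pyGetD cs j ' ' == '\n')) <;>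
    simp [Function.comp_def, h]

-- A's breaker scan, re-expressed over the reversed index range
theorem pvNextBreakerA_eq (cs : List Char) (idx len : Int) :
    pvNextBreakerA cs idx len =
      (match ((PySem.List.pyRange 0 (cs.length : Int) 1).reverse).find?
          (fun j => decide (idx ≤ j) && decide (j < idx + len) && (PySem.List.pyGetD cs j ' ' == ' ' || PySem.List.pyGetD cs j ' ' == '\t')) with
        | some j => j
        | none => (cs.length : Int)) := by
  unfold pvNextBreakerA
  rw [PySem.List.enumerate_eq_map_pyRange cs ' ', ← List.map_reverse, List.find?_map]
  cases h : ((PySem.List.pyRange 0 (cs.length : Int) 1).reverse).find?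
      (fun j => decide (idx ≤ j) && decide (j < idx + len) && (PySem.List.pyGetD cs j ' ' == ' ' || PySem.List.pyGetD cs j ' ' == '\t')) <;>
    simp [Function.comp_def, h]

-- any filtered index range is (weakly) increasing
theorem pvFilter_sorted (cs : List Char) (p : Int → Bool) :
    ((PySem.List.pyRange 0 (cs.length : Int) 1).filter p).Pairwise (· ≤ ·) :=
  (List.Pairwise.filter p (PySem.List.pairwise_lt_pyRange_one 0 (cs.length : Int))).imp le_of_lt

-- B's binary-searched newline equals A's scanned one
theorem pvNl_eq (cs : List Char) (i : Int) :
    (if PySem.List.bisectRight (pvNLS cs) i < (pvNLS cs).length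
      then PySem.List.pyGetD (pvNLS cs) ((PySem.List.bisectRight (pvNLS cs) i : Int)) 0
      else (cs.length : Int)) = pvNextNewlineA cs i := by
  unfold pvNLS
  set nls := (PySem.List.pyRange 0 (cs.length : Int) 1).filter (pvPN cs) with hnls
  set k := PySem.List.bisectRight nls i with hk
  obtain ⟨hkle, hlt, hgt⟩ := PySem.List.bisectRight_spec nls i (pvFilter_sorted cs (pvPN cs))
  rw [pvNextNewlineA_eq]
  have hcongr : (PySem.List.pyRange 0 (cs.length : Int) 1).find?
      (fun j => decide (i < j) && (PySem.List.pyGetD cs j ' ' == '\n'))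
      = (PySem.List.pyRange 0 (cs.length : Int) 1).find?
        (fun j => decide (pvPN cs j = true ∧ (decide (i < j)) = true)) := by
    apply pvFind?_congr
    intro j _
    cases h1 : pvPN cs j <;> cases h2 : decide (i < j) <;> simp_all [pvPN]
  rw [hcongr, ← List.find?_filter, ← hnls]
  have hfind : nls.find? (fun j => decide (i < j)) = nls[k]? := by
    apply pvFind?_at nls _ k hkle
    · intro j hj hjk
      have := hlt j hj hjk
      simp only [decide_eq_false_iff_not, not_lt]
      exact this
    · intro h
      have := hgt k h le_rfl
      simp only [decide_eq_true_eq]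
      exact this
  rw [hfind]
  by_cases h : k < nls.length
  · rw [if_pos h, List.getElem?_eq_getElem h]
    rw [PySem.List.pyGetD_eq_getElem nls 0 (by positivity) (by exact_mod_cast h)]
    simp [hk]
  · rw [if_neg h, List.getElem?_eq_none (by omega)]

-- B's binary-searched breaker equals A's reversed scan (as an optional position)
theorem pvBr_eq (cs : List Char) (i len : Int) :
    (if 0 < PySem.List.bisectLeft (pvBRS cs) (i + len) ∧
        i ≤ PySem.List.pyGetD (pvBRS cs) ((PySem.List.bisectLeft (pvBRS cs) (i + len) : Int) - 1) 0
      then some (PySem.List.pyGetD (pvBRS cs) ((PySem.List.bisectLeft (pvBRS cs) (i + len) : Int) - 1) 0)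
      else none)
      = ((PySem.List.pyRange 0 (cs.length : Int) 1).reverse).find?
          (fun j => decide (i ≤ j) && decide (j < i + len) && (PySem.List.pyGetD cs j ' ' == ' ' || PySem.List.pyGetD cs j ' ' == '\t')) := by
  unfold pvBRS
  set brs := (PySem.List.pyRange 0 (cs.length : Int) 1).filter (pvPB cs) with hbrs
  set m := PySem.List.bisectLeft brs (i + len) with hm
  obtain ⟨hmle, hlt, hge⟩ := PySem.List.bisectLeft_spec brs (i + len) (pvFilter_sorted cs (pvPB cs))
  have hmono : ∀ (p q : Nat) (hp : p < brs.length) (hq : q < brs.length), p ≤ q → brs[p] ≤ brs[q] := by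
    intro p q hp hq hpq
    rcases Nat.lt_or_eq_of_le hpq with h | h
    · exact (List.pairwise_iff_getElem.mp (pvFilter_sorted cs (pvPB cs))) p q hp hq h
    · subst h; rfl
  have hcongr : ((PySem.List.pyRange 0 (cs.length : Int) 1).reverse).find?
      (fun j => decide (i ≤ j) && decide (j < i + len) && (PySem.List.pyGetD cs j ' ' == ' ' || PySem.List.pyGetD cs j ' ' == '\t'))
      = ((PySem.List.pyRange 0 (cs.length : Int) 1).reverse).find?
        (fun j => decide (pvPB cs j = true ∧ (decide (i ≤ j) && decide (j < i + len)) = true)) := by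
    apply pvFind?_congr
    intro j _
    cases h1 : pvPB cs j <;> cases h2 : decide (i ≤ j) <;> cases h3 : decide (j < i + len) <;>
      simp_all [pvPB]
  rw [hcongr, ← List.find?_filter, List.filter_reverse, ← hbrs]
  by_cases hcond : 0 < m ∧ i ≤ PySem.List.pyGetD brs ((m : Int) - 1) 0
  · obtain ⟨hm0, hi⟩ := hcond
    have hmlen : m - 1 < brs.length := by omega
    have hgetd : PySem.List.pyGetD brs ((m : Int) - 1) 0 = brs[m-1] := by
      rw [show ((m : Int) - 1) = ((m - 1 : Nat) : Int) by omega]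
      rw [PySem.List.pyGetD_eq_getElem brs 0 (by positivity) (by exact_mod_cast hmlen)]
      simp
    rw [if_pos ⟨hm0, hi⟩, hgetd]
    rw [hgetd] at hi
    have hfind : brs.reverse.find? (fun j => decide (i ≤ j) && decide (j < i + len))
        = brs.reverse[brs.length - m]? := by
      apply pvFind?_at _ _ (brs.length - m) (by simp only [List.length_reverse]; omega)
      · intro t ht htk
        simp only [List.length_reverse] at ht
        rw [List.getElem_reverse]
        have := hge (brs.length - 1 - t) (by omega) (by omega)
        simp only [Bool.and_eq_false_iff, decide_eq_false_iff_not, not_lt]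
        right; omega
      · intro h
        simp only [List.length_reverse] at h
        simp only [List.getElem_reverse]
        have hv : brs[brs.length - 1 - (brs.length - m)]'(by omega) = brs[m - 1]'hmlen := by
          congr 1
          omega
        have hl := hlt (brs.length - 1 - (brs.length - m)) (by omega) (by omega)
        simp only [Bool.and_eq_true, decide_eq_true_eq]
        omega
    rw [hfind, List.getElem?_eq_getElem (by simp only [List.length_reverse]; omega)]
    congr 1
    rw [List.getElem_reverse]
    congr 1
    omega
  · rw [if_neg hcond]
    symm
    rw [List.find?_eq_none]
    intro x hx
    obtain ⟨t, ht, hxt⟩ := List.mem_iff_getElem.mp (List.mem_reverse.mp hx)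
    by_cases htm : t < m
    · -- x = brs[t] with t ≤ m-1: x ≤ brs[m-1] < i (else the condition would have held)
      have hm0 : 0 < m := by omega
      have hmlen : m - 1 < brs.length := by omega
      have hgetd : PySem.List.pyGetD brs ((m : Int) - 1) 0 = brs[m-1] := by
        rw [show ((m : Int) - 1) = ((m - 1 : Nat) : Int) by omega]
        rw [PySem.List.pyGetD_eq_getElem brs 0 (by positivity) (by exact_mod_cast hmlen)]
        simp
      have hni : ¬ i ≤ brs[m-1] := by
        intro hcontra
        exact hcond ⟨hm0, by rw [hgetd]; exact hcontra⟩
      have hle : brs[t] ≤ brs[m-1] := hmono t (m-1) ht hmlen (by omega)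
      subst hxt
      simp only [Bool.and_eq_true, decide_eq_true_eq, not_and]
      omega
    · have := hge t ht (by omega)
      subst hxt
      simp only [Bool.and_eq_true, decide_eq_true_eq, not_and]
      omega

-- bounds of A's newline scan: idx < nl ≤ n (the lower bound needs idx < n)
theorem pvNlA_bounds (cs : List Char) (i : Int) (hi : i < (cs.length : Int)) :
    i < pvNextNewlineA cs i ∧ pvNextNewlineA cs i ≤ (cs.length : Int) := by
  rw [pvNextNewlineA_eq]
  cases h : (PySem.List.pyRange 0 (cs.length : Int) 1).find?
      (fun j => decide (i < j) && (PySem.List.pyGetD cs j ' ' == '\n')) with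
  | some j =>
    have hmem := PySem.List.mem_pyRange_one.mp (List.mem_of_find?_eq_some h)
    have hp := List.find?_some h
    simp only [Bool.and_eq_true, decide_eq_true_eq] at hp
    simp only []
    omega
  | none => simp only []; omega

-- lower bound of A's breaker scan: i ≤ br (given i < n; br = n when nothing is found)
theorem pvBrA_lb (cs : List Char) (i len : Int) (hi : i < (cs.length : Int)) :
    i ≤ pvNextBreakerA cs i len := by
  rw [pvNextBreakerA_eq]
  cases h : ((PySem.List.pyRange 0 (cs.length : Int) 1).reverse).find?
      (fun j => decide (i ≤ j) && decide (j < i + len) && (PySem.List.pyGetD cs j ' ' == ' ' || PySem.List.pyGetD cs j ' ' == '\t')) with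
  | some j =>
    have hp := List.find?_some h
    simp only [Bool.and_eq_true, decide_eq_true_eq] at hp
    simp only []
    omega
  | none => simp only []; omega

-- B's cut position equals A's: min(next_newline, next_breaker + 1)
theorem pvStep_eq (cs : List Char) (i len : Int) (hi : i < (cs.length : Int)) :
    pvCut cs (pvNLS cs) (pvBRS cs) len i
      = min (pvNextNewlineA cs i) (pvNextBreakerA cs i len + 1) := by
  obtain ⟨hnl1, hnl2⟩ := pvNlA_bounds cs i hi
  have hnl := pvNl_eq cs i
  have hbr := pvBr_eq cs i len
  unfold pvCut
  simp only []
  rw [hnl, pvNextBreakerA_eq]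
  cases hfb : ((PySem.List.pyRange 0 (cs.length : Int) 1).reverse).find?
      (fun j => decide (i ≤ j) && decide (j < i + len) && (PySem.List.pyGetD cs j ' ' == ' ' || PySem.List.pyGetD cs j ' ' == '\t')) with
  | some u =>
    rw [hfb] at hbr
    by_cases hcond : 0 < PySem.List.bisectLeft (pvBRS cs) (i + len) ∧
        i ≤ PySem.List.pyGetD (pvBRS cs) ((PySem.List.bisectLeft (pvBRS cs) (i + len) : Int) - 1) 0
    · rw [if_pos hcond] at hbr
      rw [if_pos hcond, Option.some.inj hbr]
    · rw [if_neg hcond] at hbr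
      exact absurd hbr (by simp)
  | none =>
    rw [hfb] at hbr
    by_cases hcond : 0 < PySem.List.bisectLeft (pvBRS cs) (i + len) ∧
        i ≤ PySem.List.pyGetD (pvBRS cs) ((PySem.List.bisectLeft (pvBRS cs) (i + len) : Int) - 1) 0
    · rw [if_pos hcond] at hbr
      exact absurd hbr (by simp)
    · rw [if_neg hcond]
      show pvNextNewlineA cs i = min (pvNextNewlineA cs i) ((cs.length : Int) + 1)
      omega

-- the two loops agree from any nonnegative start index, for any fuel
theorem pvLoop_eq (cs : List Char) (len : Int) (fuel : Nat) :
    ∀ i : Int, 0 ≤ i →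
      pvLoopA cs len fuel i = pvLoopB cs (pvNLS cs) (pvBRS cs) len fuel i := by
  induction fuel with
  | zero => intro i _; rfl
  | succ f ih =>
    intro i h0
    by_cases hi : i < (cs.length : Int)
    · simp only [pvLoopA, pvLoopB, if_pos hi]
      obtain ⟨hnl1, hnl2⟩ := pvNlA_bounds cs i hi
      have hbr1 := pvBrA_lb cs i len hi
      rw [pvStep_eq cs i len hi]
      set E := min (pvNextNewlineA cs i) (pvNextBreakerA cs i len + 1) with hEdef
      have hlen : i + ((PySem.List.slice cs (some i) (some E)).length : Int) = E := by
        rw [PySem.List.slice_toNat cs h0 (by omega)]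
        simp only [List.length_take, List.length_drop]
        omega
      rw [hlen, ih E (by omega)]
    · simp only [pvLoopA, pvLoopB, if_neg hi]

-- ===== VERDICT (by name: the statement is the Claim_ definition above) =====
theorem chunkate_string_spec : Claim_equal_chunkate_string := by
  intro text length _
  show (pvLoopA text.toList length text.toList.length 0).map String.ofList
      = (pvLoopB text.toList (pvScan text.toList).1 (pvScan text.toList).2 length text.toList.length 0).map String.ofList
  rw [pvScan_eq, pvLoop_eq text.toList length text.toList.length 0 le_rfl]
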